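-- pv_equiv track=rewrite | github.com/woong02022/sheet_to_midi | shape.py | left_same_right_down_left_up
-- ===== SOURCE A (Python) =====
-- def left_same_right_down_left_up(made_finger, current_len):
--     """
--         모두 처리후 오른손 기준으로 제작이 됬으므로 왼손이라면 반전을 시킨다.
--         """
--
--     # 개수가 1인 경우는 3, 4, 5의 배수를 돌리고 나머지가 1인 경우 밖에 없음
--     if current_len == 1:
--         made_finger += [4]
--
--     elif current_len == 2:
--         made_finger += [3, 2]
--
--     # 길이가 3 혹은 3의 배수
--     elif current_len >= 3:
--         num_re = current_len // 3
--         remain = current_len % 3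
--         for i in range(0, num_re):
--             made_finger += [4, 3, 2]
--
--         made_finger = left_same_right_down_left_up(made_finger, remain)
--
--         # 3, 4, 5 의 배수 x, 7 이상의 노트들
--         # 무한 루프해서 4개 핑거(1234) 로 채운다음 나머지로 마무리
--     return made_finger
-- ===== SOURCE B (Python) =====
-- def left_same_right_down_left_up(made_finger, current_len):
--     # Per-position closed form: the i-th appended finger is computed directly
--     # from i and current_len in one pass over range(current_len); no block
--     # repetition, no recursion, and no special cases for 1 or 2 notes.
--     if current_len >= 1:
--         r = current_len % 3
--         for i in range(current_len):
--             if r == 2 and i >= current_len - 2: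
--                 made_finger.append(3 if i == current_len - 2 else 2)
--             elif i % 3 == 0:
--                 made_finger.append(4)
--             elif i % 3 == 1:
--                 made_finger.append(3)
--             else:
--                 made_finger.append(2)
--     return made_finger
-- ===== Notes on version B (the rewrite author's own statement) =====
-- stated objective: alternative
-- what changed: Replaced A's block-repetition loop plus recursion on the remainder by a single pass over range(current_len) that computes each finger directly from its position via a closed-form index formula, with no special cases for 1 or 2 notes.
import Mathlib
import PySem

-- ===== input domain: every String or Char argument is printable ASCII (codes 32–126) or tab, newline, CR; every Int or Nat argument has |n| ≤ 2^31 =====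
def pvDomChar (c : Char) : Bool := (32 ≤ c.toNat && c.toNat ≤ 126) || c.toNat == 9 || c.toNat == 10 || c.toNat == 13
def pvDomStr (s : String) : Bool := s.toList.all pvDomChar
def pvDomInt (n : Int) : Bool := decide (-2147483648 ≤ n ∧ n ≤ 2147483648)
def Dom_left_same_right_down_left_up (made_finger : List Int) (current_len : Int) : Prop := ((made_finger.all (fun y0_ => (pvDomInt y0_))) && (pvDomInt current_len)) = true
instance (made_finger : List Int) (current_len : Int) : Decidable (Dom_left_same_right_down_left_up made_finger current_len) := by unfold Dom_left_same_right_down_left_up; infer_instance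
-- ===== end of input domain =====

-- B computes each appended finger by a per-position closed form over range(n)
-- (no block repetition, no recursion, no 1/2-note special cases); equivalence
-- is about the return value (in Python both mutate made_finger in place).

-- ===== PORT A =====
def left_same_right_down_left_up (made_finger : List Int) (current_len : Int) : List Int :=
  if current_len = 1 then made_finger ++ [4]
  else if current_len = 2 then made_finger ++ [3, 2]
  else if _h : 3 ≤ current_len then
    let num_re := PySem.Int.floordiv current_len 3
    let remain := PySem.Int.mod current_len 3
    -- Python's 'made_finger += [4, 3, 2]' mutates in place; modelled by Array pushes
    let mf := ((PySem.List.pyRange 0 num_re 1).foldl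
      (fun acc _ => ((acc.push 4).push 3).push 2) made_finger.toArray).toList
    left_same_right_down_left_up mf remain
  else made_finger
termination_by current_len.toNat
decreasing_by
  have h1 := PySem.Int.mod_nonneg current_len (b := 3) (by norm_num)
  have h2 := PySem.Int.mod_lt current_len (b := 3) (by norm_num)
  omega

-- ===== PORT B =====
def left_same_right_down_left_up_alt (made_finger : List Int) (current_len : Int) : List Int :=
  if 1 ≤ current_len then
    let r := PySem.Int.mod current_len 3
    (PySem.List.pyRange 0 current_len 1).foldl
      (fun acc i =>
        acc ++ [if r = 2 ∧ current_len - 2 ≤ i then (if i = current_len - 2 then 3 else 2)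
                else if PySem.Int.mod i 3 = 0 then 4
                else if PySem.Int.mod i 3 = 1 then 3
                else 2]) made_finger
  else made_finger

-- ===== PRECONDITION & SPEC =====
def Spec_left_same_right_down_left_up (made_finger : List Int) (current_len : Int) (out : List Int) : Prop := out = left_same_right_down_left_up_alt made_finger current_len
instance (made_finger : List Int) (current_len : Int) (out : List Int) : Decidable (Spec_left_same_right_down_left_up made_finger current_len out) := by unfold Spec_left_same_right_down_left_up; infer_instance

-- ===== CLAIM =====
def Claim_equal_left_same_right_down_left_up : Prop := ∀ (made_finger : List Int) (current_len : Int), Dom_left_same_right_down_left_up made_finger current_len → Spec_left_same_right_down_left_up made_finger current_len (left_same_right_down_left_up made_finger current_len)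

-- ===== LEMMAS AND PROOFS =====

-- proof-side names for B's per-position formula and its Nat counterpart
def gB (n i : Int) : Int :=
  if PySem.Int.mod n 3 = 2 ∧ n - 2 ≤ i then (if i = n - 2 then 3 else 2)
  else if PySem.Int.mod i 3 = 0 then 4
  else if PySem.Int.mod i 3 = 1 then 3
  else 2

def patN (k : Nat) : Int := if k % 3 = 0 then 4 else if k % 3 = 1 then 3 else 2

def tailB (n : Int) (m : Nat) : List Int := (List.range m).map (fun k : Nat => gB n (k : Int))

theorem foldl_app {α β : Type} (l : List α) (mf : List β) (g : α → β) :
    l.foldl (fun acc i => acc ++ [g i]) mf = mf ++ l.map g := by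
  induction l generalizing mf with
  | nil => simp
  | cons x xs ih => simp [ih]

theorem alt_eq (mf : List Int) (n : Int) (h : 1 ≤ n) :
    left_same_right_down_left_up_alt mf n = mf ++ tailB n n.toNat := by
  simp only [left_same_right_down_left_up_alt, if_pos h]
  rw [PySem.List.pyRange_one, List.foldl_map, foldl_app]
  simp [tailB, gB]

theorem gB_patN (n : Int) (k : Nat)
    (hc : ¬(PySem.Int.mod n 3 = 2 ∧ n - 2 ≤ (k : Int))) : gB n k = patN k := by
  have hm : PySem.Int.mod (k : Int) 3 = ((k % 3 : Nat) : Int) := by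
    rw [PySem.Int.mod_eq_emod_of_pos (by norm_num)]; omega
  rw [gB, if_neg hc, hm]
  have h3 : k % 3 = 0 ∨ k % 3 = 1 ∨ k % 3 = 2 := by omega
  rcases h3 with h | h | h <;> simp [patN, h]

theorem patN_add3 (k : Nat) : patN (3 + k) = patN k := by
  simp [patN, Nat.add_mod_left]

theorem L1 (q s : Nat) :
    (List.range (3 * q + s)).map patN
      = (List.replicate q ([(4 : Int), 3, 2])).flatten ++ (List.range s).map patN := by
  induction q with
  | zero => simp
  | succ p ih =>
      have h : 3 * (p + 1) + s = 3 + (3 * p + s) := by ring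
      rw [h, List.range_add, List.map_append, List.map_map]
      have hmap : ((patN ∘ fun k => 3 + k) : Nat → Int) = patN := by
        funext k; simp [Function.comp, patN_add3]
      have h3 : (List.range 3).map patN = [4, 3, 2] := by decide
      rw [hmap, ih, h3, List.replicate_succ]
      simp

theorem foldBlocks_eq (m : Nat) (acc : Array Int) :
    ((List.range m).foldl (fun acc _ => ((acc.push 4).push 3).push 2) acc).toList
      = acc.toList ++ (List.replicate m ([(4:Int), 3, 2])).flatten := by
  induction m generalizing acc with
  | zero => simp
  | succ k ih =>
      rw [List.range_succ, List.foldl_append]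
      simp only [List.foldl_cons, List.foldl_nil, Array.toList_push]
      rw [ih, List.replicate_succ']
      simp

theorem foldBlocks_pyRange (m : Int) (acc : List Int) :
    ((PySem.List.pyRange 0 m 1).foldl
        (fun acc _ => ((acc.push 4).push 3).push 2) acc.toArray).toList
      = acc ++ (List.replicate m.toNat ([(4:Int), 3, 2])).flatten := by
  rw [PySem.List.pyRange_one, List.foldl_map]
  simpa using foldBlocks_eq (m - 0).toNat acc.toArray

-- the crux: A = B for every current_len ≥ 1
theorem key (mf : List Int) (n : Int) (h : 1 ≤ n) :
    left_same_right_down_left_up mf n = left_same_right_down_left_up_alt mf n := by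
  rw [alt_eq mf n h]
  by_cases h1 : n = 1
  · subst h1
    have ht : tailB 1 (Int.toNat 1) = [4] := by decide
    rw [ht, left_same_right_down_left_up]
    simp
  by_cases h2 : n = 2
  · subst h2
    have ht : tailB 2 (Int.toNat 2) = [3, 2] := by decide
    rw [ht, left_same_right_down_left_up]
    simp
  have h3 : 3 ≤ n := by omega
  set N := n.toNat with hNdef
  have hN : (N : Int) = n := Int.toNat_of_nonneg (by omega)
  set q := N / 3 with hq
  set s := N % 3 with hs
  have hNqs : N = 3 * q + s := (Nat.div_add_mod N 3).symm
  have hslt : s < 3 := Nat.mod_lt _ (by norm_num)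
  have hmod : PySem.Int.mod n 3 = (s : Int) := by
    rw [PySem.Int.mod_eq_emod_of_pos (by norm_num)]; omega
  have hdiv : PySem.Int.floordiv n 3 = (q : Int) := by
    rw [PySem.Int.floordiv_eq_ediv_of_pos (by norm_num)]; omega
  rw [left_same_right_down_left_up]
  simp only [h1, h2, if_false, dif_pos h3]
  rw [foldBlocks_pyRange, hdiv, hmod, Int.toNat_natCast]
  have hprefix : ∀ m : Nat, (∀ k, k < m → ¬(PySem.Int.mod n 3 = 2 ∧ n - 2 ≤ (k : Int))) →
      tailB n m = (List.range m).map patN := by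
    intro m hall
    apply List.map_congr_left
    intro k hk
    exact gB_patN n k (hall k (List.mem_range.mp hk))
  interval_cases s
  · -- remainder 0: recursive call returns its argument unchanged
    rw [left_same_right_down_left_up]
    have hall : ∀ k, k < N → ¬(PySem.Int.mod n 3 = 2 ∧ n - 2 ≤ (k : Int)) := by
      intro k _ hcon; rw [hmod] at hcon; omega
    rw [hprefix N hall]
    have hN0 : N = 3 * q + 0 := hNqs
    rw [hN0, L1]
    simp
  · -- remainder 1
    rw [left_same_right_down_left_up]
    have hall : ∀ k, k < N → ¬(PySem.Int.mod n 3 = 2 ∧ n - 2 ≤ (k : Int)) := by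
      intro k _ hcon; rw [hmod] at hcon; omega
    rw [hprefix N hall, hNqs, L1]
    simp [patN]
  · -- remainder 2: last two positions come from B's special branch
    rw [left_same_right_down_left_up]
    have hr2 : (List.range 2) = [0, 1] := by decide
    have hsplit : tailB n N
        = tailB n (3 * q) ++ [gB n ((3 * q : Nat) : Int), gB n (((3 * q : Nat) : Int) + 1)] := by
      rw [tailB, hNqs, List.range_add, List.map_append, hr2]
      simp [tailB]
    have hall : ∀ k, k < 3 * q → ¬(PySem.Int.mod n 3 = 2 ∧ n - 2 ≤ (k : Int)) := by
      intro k hk hcon; omega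
    have hn2 : ((3 * q : Nat) : Int) = n - 2 := by omega
    have hg1 : gB n ((3 * q : Nat) : Int) = 3 := by
      rw [gB, if_pos ⟨hmod, by omega⟩, if_pos hn2]
    have hg2 : gB n (((3 * q : Nat) : Int) + 1) = 2 := by
      rw [gB, if_pos ⟨hmod, by omega⟩, if_neg (by omega)]
    rw [hsplit, hprefix (3 * q) hall, hg1, hg2]
    have hL : (List.range (3 * q)).map patN
        = (List.replicate q ([(4 : Int), 3, 2])).flatten := by
      simpa using L1 q 0
    rw [hL]
    simp

-- ===== VERDICT =====
theorem left_same_right_down_left_up_spec : Claim_equal_left_same_right_down_left_up := by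
  intro mf n _
  unfold Spec_left_same_right_down_left_up
  by_cases h : 1 ≤ n
  · exact key mf n h
  · have h1 : ¬ n = 1 := by omega
    have h2 : ¬ n = 2 := by omega
    have h3 : ¬ 3 ≤ n := by omega
    rw [left_same_right_down_left_up, left_same_right_down_left_up_alt]
    simp [h1, h2, h3, h]
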